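-- pv_equiv track=rewrite | github.com/Prasanna030/Plivo-NER | src/predict.py | _token_left
-- ===== SOURCE A (Python) =====
-- def _token_left(text: str, idx: int):
--     j = idx - 1
--     while j >= 0 and text[j].isspace():
--         j -= 1
--     if j < 0:
--         return None, idx
--     end = j + 1
--     while j >= 0 and not text[j].isspace():
--         j -= 1
--     start = j + 1
--     return text[start:end], start
-- ===== SOURCE B (Python) =====
-- def _token_left(text: str, idx: int):
--     # Nothing lies to the left of a non-positive index.
--     if idx <= 0:
--         return None, idx
--     stripped = text[:idx].rstrip()
--     if not stripped:
--         return None, idx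
--     token = stripped.split()[-1]
--     return token, len(stripped) - len(token)
-- ===== Notes on version B (the rewrite author's own statement) =====
-- stated objective: simpler
-- what changed: Replaces A's two explicit backward character-scanning while-loops over indices by a prefix-based decomposition: rstrip the prefix text[:idx], take the last word of its split() as the token and compute the start position from the two lengths.
import Mathlib
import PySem

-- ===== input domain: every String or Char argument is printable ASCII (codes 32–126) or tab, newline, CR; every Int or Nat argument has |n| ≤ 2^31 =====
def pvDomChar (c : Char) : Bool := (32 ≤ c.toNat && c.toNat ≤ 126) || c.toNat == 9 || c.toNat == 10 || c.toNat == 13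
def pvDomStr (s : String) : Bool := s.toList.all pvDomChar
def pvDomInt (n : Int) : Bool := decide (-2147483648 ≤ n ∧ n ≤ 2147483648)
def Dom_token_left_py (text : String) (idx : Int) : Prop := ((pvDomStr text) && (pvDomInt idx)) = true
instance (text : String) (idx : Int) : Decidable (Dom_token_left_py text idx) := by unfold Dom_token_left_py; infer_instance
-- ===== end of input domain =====

-- B replaces A's two backward character-scanning while-loops by rstrip + split on the prefix,
-- returning the last word of the stripped prefix (objective: simpler).

-- ===== PORT A =====
-- A's backward scan 'while j >= 0 and p(text[j]): j -= 1' (used twice: p = isspace, p = not isspace);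
-- the default ' ' of pyGetD is never read while 0 ≤ j stays in range (guaranteed under Pre_).
def tlScan (cs : List Char) (p : Char → Bool) (j : Int) : Int :=
  if h : 0 ≤ j ∧ p (PySem.List.pyGetD cs j ' ') = true then tlScan cs p (j - 1) else j
  termination_by (j + 1).toNat
  decreasing_by have := h.1; omega

def token_left_py (text : String) (idx : Int) : Option String × Int :=
  let j := tlScan text.toList PySem.Chars.isspace (idx - 1)
  if j < 0 then (none, idx)
  else
    let e := j + 1
    let j2 := tlScan text.toList (fun c => !PySem.Chars.isspace c) j
    let start := j2 + 1
    (some (PySem.Str.slice text (some start) (some e)), start)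

-- ===== PORT B =====
def token_left_py_alt (text : String) (idx : Int) : Option String × Int :=
  if idx ≤ 0 then (none, idx)
  else
    let stripped := PySem.Str.rstrip (PySem.Str.slice text none (some idx))
    if stripped = "" then (none, idx)
    else
      let token := PySem.List.pyGetD (PySem.Str.split₀ stripped) (-1) ""
      (some token, PySem.Str.len stripped - PySem.Str.len token)

-- ===== PRECONDITION & SPEC =====
-- Pre_ excludes exactly idx > len(text), where A raises IndexError (it reads text[idx-1]); A returns on every other input.
def Pre_token_left_py (text : String) (idx : Int) : Prop := idx ≤ PySem.Str.len text
instance (text : String) (idx : Int) : Decidable (Pre_token_left_py text idx) := by unfold Pre_token_left_py; infer_instance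
def pvWitness_token_left_py : String × Int := ("hello world", 8)

def Spec_token_left_py (text : String) (idx : Int) (out : Option String × Int) : Prop := out = token_left_py_alt text idx
instance (text : String) (idx : Int) (out : Option String × Int) : Decidable (Spec_token_left_py text idx out) := by unfold Spec_token_left_py; infer_instance

-- ===== CLAIM (what is proved, stated in full; the proofs are below) =====
def Claim_equal_token_left_py : Prop := ∀ (text : String) (idx : Int), Dom_token_left_py text idx → Pre_token_left_py text idx → Spec_token_left_py text idx (token_left_py text idx)

-- ===== LEMMAS AND PROOFS =====

-- A's scan starting at m-1 skips exactly the longest p-block at the end of the first m characters.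
theorem tlScan_eq (cs : List Char) (p : Char → Bool) :
    ∀ m : Nat, m ≤ cs.length →
      tlScan cs p ((m : Int) - 1) = (m : Int) - ((cs.take m).reverse.takeWhile p).length - 1 := by
  intro m
  induction m with
  | zero => intro _; rw [tlScan]; simp
  | succ k ih =>
    intro h
    have hk : k < cs.length := by omega
    have hidx : ((k + 1 : Nat) : Int) - 1 = (k : Int) := by omega
    have hget : PySem.List.pyGetD cs (k : Int) ' ' = cs[k] := by
      simp [List.getD_eq_getElem?_getD, List.getElem?_eq_getElem hk]
    rw [tlScan, hidx, hget]
    rw [List.take_succ_eq_append_getElem hk, List.reverse_append]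
    simp only [List.reverse_cons, List.reverse_nil, List.nil_append, List.singleton_append,
      List.takeWhile_cons]
    by_cases hp : p cs[k] = true
    · rw [dif_pos ⟨by omega, hp⟩, hp]
      rw [ih (by omega)]
      rw [if_pos rfl, List.length_cons]
      push_cast
      omega
    · rw [dif_neg (by simp [hp]), if_neg hp]
      simp only [List.length_nil]
      push_cast
      omega

theorem takeWhile_concat_of_neg {p : Char → Bool} {v : List Char} {a : Char} (h : p a = false) :
    (v ++ [a]).takeWhile p = v.takeWhile p := by
  rw [List.takeWhile_append]
  split_ifs with hl
  · have hv : v.takeWhile p = v := (List.takeWhile_prefix p).eq_of_length hl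
    simp [hv, h]
  · rfl

theorem takeWhile_concat_of_mem {p : Char → Bool} {v : List Char} {a : Char}
    (x : Char) (hx : x ∈ v) (hpx : p x = false) :
    (v ++ [a]).takeWhile p = v.takeWhile p := by
  rw [List.takeWhile_append]
  split_ifs with hl
  · exfalso
    have hv : v.takeWhile p = v := (List.takeWhile_prefix p).eq_of_length hl
    have := List.takeWhile_eq_self_iff.mp hv x hx
    simp [hpx] at this
  · rfl

-- Last piece produced by split₀.go on a list ending in a non-space character.
theorem split₀_go_getLast (c : Char) (hc : PySem.Chars.isspace c = false) :
    ∀ (u : List Char) (cur : List Char) (acc : List (List Char)),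
      (PySem.Chars.split₀.go (u ++ [c]) cur acc).getLast? =
        some (if u.any PySem.Chars.isspace
              then ((u ++ [c]).reverse.takeWhile (fun x => !PySem.Chars.isspace x)).reverse
              else cur.reverse ++ u ++ [c]) := by
  intro u
  induction u with
  | nil =>
    intro cur acc
    simp only [List.nil_append, PySem.Chars.split₀.go, hc]
    simp
  | cons a u' ih =>
    intro cur acc
    by_cases ha : PySem.Chars.isspace a = true
    · have hrw : PySem.Chars.split₀.go ((a :: u') ++ [c]) cur acc =
          (if cur.isEmpty then PySem.Chars.split₀.go (u' ++ [c]) [] acc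
           else PySem.Chars.split₀.go (u' ++ [c]) [] (cur.reverse :: acc)) := by
        simp [PySem.Chars.split₀.go, ha]
      have key : ∀ acc2 : List (List Char),
          (PySem.Chars.split₀.go (u' ++ [c]) [] acc2).getLast? =
            some (((a :: u' ++ [c]).reverse.takeWhile (fun x => !PySem.Chars.isspace x)).reverse) := by
        intro acc2
        rw [ih [] acc2]
        have hTW : ((a :: u' ++ [c]).reverse.takeWhile (fun x => !PySem.Chars.isspace x)) =
            ((u' ++ [c]).reverse.takeWhile (fun x => !PySem.Chars.isspace x)) := by
          rw [show (a :: u' ++ [c]).reverse = (u' ++ [c]).reverse ++ [a] by simp]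
          exact takeWhile_concat_of_neg (by simp [ha])
        rw [hTW]
        by_cases hu : u'.any PySem.Chars.isspace
        · simp [hu]
        · have hall : (u' ++ [c]).reverse.takeWhile (fun x => !PySem.Chars.isspace x) = (u' ++ [c]).reverse := by
            apply List.takeWhile_eq_self_iff.mpr
            intro x hx
            simp only [List.mem_reverse, List.mem_append, List.mem_singleton] at hx
            rcases hx with hx | rfl
            · simp at hu
              simp [hu x hx]
            · simp [hc]
          rw [if_neg hu, hall, List.reverse_reverse]
          simp
      rw [hrw]
      simp only [List.cons_append]
      by_cases hcur : cur.isEmpty = true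
      · rw [if_pos hcur, key, if_pos (by simp [ha])]
        simp
      · rw [if_neg hcur, key, if_pos (by simp [ha])]
        simp
    · have hrw : PySem.Chars.split₀.go ((a :: u') ++ [c]) cur acc =
          PySem.Chars.split₀.go (u' ++ [c]) (a :: cur) acc := by
        simp [PySem.Chars.split₀.go, ha]
      rw [hrw, ih (a :: cur) acc]
      have hany : (a :: u').any PySem.Chars.isspace = u'.any PySem.Chars.isspace := by
        simp [ha]
      by_cases hu : u'.any PySem.Chars.isspace
      · have hTW : ((a :: u' ++ [c]).reverse.takeWhile (fun x => !PySem.Chars.isspace x)) =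
            ((u' ++ [c]).reverse.takeWhile (fun x => !PySem.Chars.isspace x)) := by
          rw [show (a :: u' ++ [c]).reverse = (u' ++ [c]).reverse ++ [a] by simp]
          obtain ⟨x, hx, hpx⟩ := List.any_eq_true.mp hu
          exact takeWhile_concat_of_mem x (by simp [hx]) (by simp [hpx])
        rw [if_pos hu, if_pos (hany.trans hu), hTW]
      · rw [if_neg (by simp [hu]), if_neg (by rw [hany]; exact hu)]
        simp

theorem split₀_getLast (u : List Char) (c : Char) (hc : PySem.Chars.isspace c = false) :
    (PySem.Chars.split₀ (u ++ [c])).getLast? =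
      some (((u ++ [c]).reverse.takeWhile (fun x => !PySem.Chars.isspace x)).reverse) := by
  unfold PySem.Chars.split₀
  rw [split₀_go_getLast c hc u [] []]
  by_cases hu : u.any PySem.Chars.isspace
  · rw [if_pos hu]
  · rw [if_neg hu]
    congr 1
    have hall : (u ++ [c]).reverse.takeWhile (fun x => !PySem.Chars.isspace x) = (u ++ [c]).reverse := by
      apply List.takeWhile_eq_self_iff.mpr
      intro x hx
      simp only [List.mem_reverse, List.mem_append, List.mem_singleton] at hx
      rcases hx with hx | rfl
      · simp at hu
        simp [hu x hx]
      · simp [hc]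
    rw [hall, List.reverse_reverse]
    simp

-- ===== VERDICT (by name: the statement is the Claim_ definition above) =====
set_option maxHeartbeats 1000000 in
theorem token_left_py_spec : Claim_equal_token_left_py := by
  intro text idx _ hpre
  show token_left_py text idx = token_left_py_alt text idx
  unfold Pre_token_left_py at hpre
  rw [PySem.Str.len_eq] at hpre
  by_cases h0 : idx ≤ 0
  · have hscan : tlScan text.toList PySem.Chars.isspace (idx - 1) = idx - 1 := by
      rw [tlScan, dif_neg (by rintro ⟨h, -⟩; omega)]
    simp only [token_left_py, token_left_py_alt, hscan]
    rw [if_pos (by omega : idx - 1 < 0), if_pos h0]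
  · set cs := text.toList with hcs
    obtain ⟨m, hmi⟩ : ∃ m : Nat, (m : Int) = idx := ⟨idx.toNat, Int.toNat_of_nonneg (by omega)⟩
    have hm : m ≤ cs.length := by omega
    set sp := PySem.Chars.isspace with hsp
    set q : Char → Bool := fun c => !PySem.Chars.isspace c with hq
    set r : List Char := (cs.take m).reverse with hr
    have hrlen : r.length = m := by
      rw [hr]; simp [List.length_take]; omega
    set k1 := (r.takeWhile sp).length with hk1
    have h1 : tlScan cs sp (idx - 1) = (m : Int) - k1 - 1 := by
      rw [← hmi]; exact tlScan_eq cs sp m hm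
    set r1 := r.dropWhile sp with hr1def
    have hsum : k1 + r1.length = m := by
      have h := congrArg List.length (List.takeWhile_append_dropWhile (p := sp) (l := r))
      simp only [List.length_append] at h
      rw [← hr1def, ← hk1, hrlen] at h
      omega
    have hstrip : (PySem.Str.rstrip (PySem.Str.slice text none (some idx))).toList = r1.reverse := by
      rw [PySem.Str.toList_rstrip, PySem.Str.toList_slice]
      simp only [PySem.Chars.slice_eq_listSlice]
      rw [← hmi, PySem.List.slice_to_natCast]
      rfl
    by_cases hempty : r1 = []
    · have hk1m : k1 = m := by rw [hempty] at hsum; simpa using hsum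
      have hA : tlScan cs sp (idx - 1) = (m : Int) - m - 1 := by rw [h1, hk1m]
      have hBe : PySem.Str.rstrip (PySem.Str.slice text none (some idx)) = "" := by
        apply String.toList_inj.mp
        rw [hstrip, hempty]
        rfl
      simp only [token_left_py, token_left_py_alt, ← hcs]
      rw [hA, if_pos (by omega), if_neg h0, if_pos hBe]
    · have hm'le : r1.length ≤ m := by omega
      set m' := r1.length with hm'def
      have hm'pos : 0 < m' := by
        rw [hm'def]; exact List.length_pos_of_ne_nil hempty
      have hj : tlScan cs sp (idx - 1) = (m' : Int) - 1 := by rw [h1]; omega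
      have hhead : sp (r1.head hempty) = false := List.head_dropWhile_not sp hempty
      have htake' : cs.take m' = r1.reverse := by
        have h1' : cs.take m' = (cs.take m).take m' := by
          rw [List.take_take, Nat.min_eq_left hm'le]
        have h2' : cs.take m = r.reverse := by rw [hr, List.reverse_reverse]
        have h3' : r.reverse = r1.reverse ++ (r.takeWhile sp).reverse := by
          conv_lhs => rw [← List.takeWhile_append_dropWhile (p := sp) (l := r)]
          rw [List.reverse_append]
        rw [h1', h2', h3']
        have h4' : r1.reverse.length = m' := by simp [hm'def]
        rw [← h4', List.take_left]
      set tok := r1.takeWhile q with htokdef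
      have htokne : tok ≠ [] := by
        obtain ⟨c0, r1t, he⟩ := List.exists_cons_of_ne_nil hempty
        have hhd : r1.head hempty = c0 := by simp [he]
        have hc0 : sp c0 = false := by rw [← hhd]; exact hhead
        rw [htokdef, he, List.takeWhile_cons, if_pos (by simp only [hq, Bool.not_eq_true']; exact hc0)]
        simp
      have htoklen : tok.length ≤ m' := by
        rw [htokdef, hm'def]; exact (List.takeWhile_prefix q).length_le
      have h2 : tlScan cs q ((m' : Int) - 1) = (m' : Int) - tok.length - 1 := by
        have hx := tlScan_eq cs q m' (le_trans hm'le hm)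
        rw [htake', List.reverse_reverse] at hx
        exact hx
      set rest := r1.dropWhile q with hrestdef
      have hsplit_r1 : tok ++ rest = r1 := List.takeWhile_append_dropWhile
      have hrevwrite : r1.reverse = rest.reverse ++ tok.reverse := by
        rw [← hsplit_r1, List.reverse_append]
      have hrestlen : rest.length = m' - tok.length := by
        have := congrArg List.length hsplit_r1
        simp only [List.length_append] at this
        omega
      have hAs : (PySem.Str.slice text (some ((m' : Int) - tok.length - 1 + 1)) (some ((m' : Int) - 1 + 1))).toList = tok.reverse := by
        rw [PySem.Str.toList_slice]
        simp only [PySem.Chars.slice_eq_listSlice]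
        have e1 : (m' : Int) - tok.length - 1 + 1 = ((m' - tok.length : Nat) : Int) := by push_cast; omega
        have e2 : (m' : Int) - 1 + 1 = ((m' : Nat) : Int) := by omega
        rw [e1, e2, PySem.List.slice_natCast]
        have e3 : m' - (m' - tok.length) = tok.length := by omega
        rw [e3, ← hcs]
        conv_lhs => rw [← List.take_append_drop m' cs]
        rw [htake', hrevwrite, List.append_assoc]
        have e4 : rest.reverse.length = m' - tok.length := by simp [hrestlen]
        rw [← e4, List.drop_left]
        have e5 : tok.reverse.length = tok.length := by simp
        rw [← e5, List.take_left]
      have hstrne : PySem.Str.rstrip (PySem.Str.slice text none (some idx)) ≠ "" := by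
        intro he
        apply hempty
        have hx := congrArg String.toList he
        rw [hstrip] at hx
        simpa using hx
      have hlast : (PySem.Chars.split₀ r1.reverse).getLast? = some tok.reverse := by
        obtain ⟨c0, r1t, he⟩ := List.exists_cons_of_ne_nil hempty
        have hhd : r1.head hempty = c0 := by simp [he]
        have hc0 : sp c0 = false := by rw [← hhd]; exact hhead
        rw [he, List.reverse_cons, split₀_getLast r1t.reverse c0 hc0]
        have hback : (r1t.reverse ++ [c0]).reverse = r1 := by rw [he]; simp
        rw [hback]
      have hmap : ((PySem.Str.split₀ (PySem.Str.rstrip (PySem.Str.slice text none (some idx)))).map String.toList).getLast? = some tok.reverse := by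
        rw [PySem.Str.split₀_map_toList, hstrip, hlast]
      set parts := PySem.Str.split₀ (PySem.Str.rstrip (PySem.Str.slice text none (some idx))) with hpartsdef
      have hpartsne : parts ≠ [] := by
        intro he; rw [he] at hmap; simp at hmap
      rw [List.getLast?_map] at hmap
      obtain ⟨tstr, hgl, htl⟩ : ∃ tstr : String, parts.getLast? = some tstr ∧ tstr.toList = tok.reverse := by
        cases hgl : parts.getLast? with
        | none => rw [hgl] at hmap; simp at hmap
        | some t => rw [hgl] at hmap; exact ⟨t, rfl, by simpa using hmap⟩
      have hpy : PySem.List.pyGetD parts (-1) "" = tstr := by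
        rw [PySem.List.pyGetD_neg_one parts "" hpartsne]
        have := List.getLast?_eq_some_getLast hpartsne
        rw [this] at hgl
        exact Option.some_injective _ hgl.symm ▸ rfl
      have hlenst : PySem.Str.len (PySem.Str.rstrip (PySem.Str.slice text none (some idx))) = (m' : Int) := by
        rw [PySem.Str.len_eq, hstrip]
        simp [hm'def]
      have hlentok : PySem.Str.len tstr = (tok.length : Int) := by
        rw [PySem.Str.len_eq, htl]
        simp
      have hstr_eq : PySem.Str.slice text (some ((m' : Int) - ↑tok.length - 1 + 1)) (some ((m' : Int) - 1 + 1)) = tstr :=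
        String.toList_inj.mp (by rw [hAs, htl])
      simp only [token_left_py, token_left_py_alt, ← hcs]
      rw [hj, if_neg (by omega), h2, if_neg h0, if_neg hstrne, ← hpartsdef, hpy]
      rw [hlenst, hlentok, hstr_eq]
      refine Prod.ext rfl ?_
      simp
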